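-- pv_equiv track=rewrite | github.com/RithenReddy/mindmap-interviewer | agent/onboarding_scraper.py | _prioritize_tool
-- ===== SOURCE A (Python) =====
-- def _prioritize_tool(candidates: list[str], preferred_tool: str) -> list[str]:
--     unique = []
--     seen = set()
--     for item in candidates:
--         if item not in seen:
--             unique.append(item)
--             seen.add(item)
--     if preferred_tool in unique:
--         unique.remove(preferred_tool)
--     return [preferred_tool] + unique
-- ===== SOURCE B (Python) =====
-- def _prioritize_tool(candidates: list[str], preferred_tool: str) -> list[str]:
--     # Dedup without any seen-set: repeatedly take the head of what remains,
--     # drop every later copy of it by filtering, and keep it unless it is the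
--     # preferred tool; the preferred tool is prepended once at the front.
--     result = [preferred_tool]
--     lst = candidates
--     while lst:
--         head = lst[0]
--         lst = [y for y in lst[1:] if y != head]
--         if head != preferred_tool:
--             result.append(head)
--     return result
-- ===== Notes on version B (the rewrite author's own statement) =====
-- stated objective: alternative
-- what changed: Replaces A's seen-set accumulation loop plus a separate membership test and remove() scan by a head/filtered-tail dedup: each round keeps the head of the remaining list (unless it is the preferred tool) and filters all later copies of it out before the next round; the preferred tool is seeded at the front.
import Mathlib
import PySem

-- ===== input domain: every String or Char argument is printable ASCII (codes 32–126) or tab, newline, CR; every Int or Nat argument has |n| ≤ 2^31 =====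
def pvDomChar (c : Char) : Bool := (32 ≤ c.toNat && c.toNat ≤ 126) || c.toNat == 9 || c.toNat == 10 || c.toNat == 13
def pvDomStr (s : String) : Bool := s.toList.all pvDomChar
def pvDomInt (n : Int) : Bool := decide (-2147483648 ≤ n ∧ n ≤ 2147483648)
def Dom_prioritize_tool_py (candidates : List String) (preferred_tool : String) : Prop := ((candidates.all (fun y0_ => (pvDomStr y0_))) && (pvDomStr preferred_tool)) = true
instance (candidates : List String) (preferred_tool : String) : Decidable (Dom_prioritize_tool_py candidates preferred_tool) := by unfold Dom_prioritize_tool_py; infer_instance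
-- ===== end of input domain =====

-- B replaces A's seen-set loop + membership test + remove() scan by a
-- head/filtered-tail dedup loop that skips the preferred tool; objective: alternative.

-- ===== PORT A =====
def prioritize_tool_py (candidates : List String) (preferred_tool : String) : List String :=
  -- for item in candidates: if item not in seen: unique.append(item); seen.add(item)
  let st := candidates.foldl
    (fun (st : List String × PySem.Set String) item =>
      if PySem.Set.contains st.2 item then st
      else (st.1 ++ [item], PySem.Set.add st.2 item))
    ([], PySem.Set.empty)
  -- if preferred_tool in unique: unique.remove(preferred_tool)
  let unique :=
    if st.1.contains preferred_tool then
      (PySem.List.remove? st.1 preferred_tool).getD st.1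
    else st.1
  [preferred_tool] ++ unique

-- ===== PORT B =====
-- Source B's 'while lst' loop: each round takes the head, filters its later copies
-- out of the tail, and keeps the head unless it is the preferred tool.
def pvRest (p : String) : List String → List String
  | [] => []
  | x :: xs =>
    (if x != p then [x] else []) ++ pvRest p (xs.filter (fun y => y != x))
termination_by l => l.length
decreasing_by
  simp only [List.length_unattach, List.length_cons]
  refine Nat.lt_succ_of_le (le_trans (List.length_filter_le _ _) ?_)
  simp

def prioritize_tool_py_alt (candidates : List String) (preferred_tool : String) : List String :=
  [preferred_tool] ++ pvRest preferred_tool candidates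

-- ===== PRECONDITION & SPEC =====
def Spec_prioritize_tool_py (candidates : List String) (preferred_tool : String) (out : List String) : Prop := out = prioritize_tool_py_alt candidates preferred_tool
instance (candidates : List String) (preferred_tool : String) (out : List String) : Decidable (Spec_prioritize_tool_py candidates preferred_tool out) := by unfold Spec_prioritize_tool_py; infer_instance

-- ===== CLAIM (what is proved, stated in full; the proofs are below) =====
def Claim_equal_prioritize_tool_py : Prop := ∀ (candidates : List String) (preferred_tool : String), Dom_prioritize_tool_py candidates preferred_tool → Spec_prioritize_tool_py candidates preferred_tool (prioritize_tool_py candidates preferred_tool)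

-- ===== LEMMAS AND PROOFS =====

-- A's loop keeps unique = seen (as lists); from a common start s it computes Set.update s l twice.
theorem pv_loop_eq (l : List String) (s : PySem.Set String) :
    l.foldl
      (fun (st : List String × PySem.Set String) item =>
        if PySem.Set.contains st.2 item then st
        else (st.1 ++ [item], PySem.Set.add st.2 item))
      (s, s)
    = (PySem.Set.update s l, PySem.Set.update s l) := by
  induction l generalizing s with
  | nil => simp [PySem.Set.update]
  | cons x xs ih =>
      have hstep :
          (if PySem.Set.contains s x then (s, s)
           else (s ++ [x], PySem.Set.add s x))
            = (PySem.Set.add s x, PySem.Set.add s x) := by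
        simp only [PySem.Set.add, PySem.Set.contains]
        split_ifs with h <;> simp
      simp only [List.foldl_cons, hstep, ih, PySem.Set.update_cons]

-- ordered dedup commutes with a ≠-filter
theorem pv_ofList_filter (p : String) (l : List String) :
    PySem.Set.ofList (l.filter (fun c => c != p))
      = (PySem.Set.ofList l).filter (fun c => c != p) := by
  induction l with
  | nil => rfl
  | cons x xs ih =>
      by_cases hx : x = p
      · subst hx
        simp only [List.filter_cons, bne_self_eq_false, Bool.false_eq_true, if_false, ih,
          PySem.Set.ofList_cons, PySem.Set.discard]
        rw [List.filter_filter]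
        apply List.filter_congr
        intro y _
        by_cases hy : y = x
        · subst hy; simp
        · simp [hy]
      · have hb : (x != p) = true := by simp [hx]
        simp only [List.filter_cons, hb, if_true, PySem.Set.ofList_cons, ih, PySem.Set.discard]
        rw [List.filter_filter, List.filter_filter]
        congr 1
        apply List.filter_congr
        intro y _
        exact Bool.and_comm _ _

-- conditional remove on a Nodup list is a filter
theorem pv_remove_eq_filter (p : String) (d : List String) (hd : d.Nodup) :
    (if d.contains p then (PySem.List.remove? d p).getD d else d)
      = d.filter (fun c => c != p) := by
  by_cases h : p ∈ d
  · have hc : d.contains p = true := by simpa using h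
    rw [hc, if_pos rfl, PySem.List.remove?_eq_some_erase d p h, Option.getD_some,
      List.Nodup.erase_eq_filter hd]
  · have hc : d.contains p = false := by simpa using h
    rw [hc]
    simp only [Bool.false_eq_true, if_false]
    symm
    apply List.filter_eq_self.2
    intro y hy
    have : y ≠ p := fun e => h (e ▸ hy)
    simp [this]

-- B's recursion computes the ≠p-filtered ordered dedup
theorem pv_rest_eq (p : String) (l : List String) :
    pvRest p l = (PySem.Set.ofList l).filter (fun c => c != p) := by
  induction hn : l.length using Nat.strong_induction_on generalizing l with
  | _ n ih =>
    cases l with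
    | nil => simp [pvRest.eq_def]
    | cons x xs =>
      subst hn
      have htail : (xs.filter (fun y => y != x)).length < (x :: xs).length :=
        Nat.lt_succ_of_le (List.length_filter_le _ _)
      rw [pvRest.eq_def]
      dsimp only
      rw [ih _ htail _ rfl, pv_ofList_filter x xs]
      simp only [PySem.Set.ofList_cons, List.filter_cons, PySem.Set.discard]
      split_ifs with h
      · simp [bne]
      · simp [bne]

-- ===== VERDICT (by name: the statement is the Claim_ definition above) =====
theorem prioritize_tool_py_spec : Claim_equal_prioritize_tool_py := by
  intro candidates preferred_tool _
  have hloop := pv_loop_eq candidates PySem.Set.empty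
  unfold Spec_prioritize_tool_py prioritize_tool_py prioritize_tool_py_alt
  simp only [PySem.Set.empty] at hloop ⊢
  rw [hloop, PySem.Set.update_nil_left,
    pv_remove_eq_filter preferred_tool _ (PySem.Set.nodup_ofList candidates),
    pv_rest_eq]
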